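-- pv_equiv track=rewrite | github.com/Christian-OSS-code/python-class | STUDENT GRADE BUILDER  PYTHON/hardestsubject.py | get_numberofpasses
-- ===== SOURCE A (Python) =====
-- def get_numberofpasses(student_records:dict):
--     subject_score_lists3 = list(map(list, zip(*student_records.values())))
--
--
--     pass_list = []
--
--     for count, scores in enumerate(subject_score_lists3):
--         pass_list.append([i for i, score in enumerate(scores) if score >= 50])
--     number_of_passes_lists = []
--     for values in pass_list:
--         number_of_passes_lists.append(len(values))
--
--
--
--     return number_of_passes_lists
-- ===== SOURCE B (Python) =====
-- def get_numberofpasses(student_records: dict):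
--     # One row-major pass instead of transposing: zip truncates at the shortest
--     # row, so we count over the first m = min row length positions.
--     rows = list(student_records.values())
--     if not rows:
--         return []
--     m = min(len(r) for r in rows)
--     counts = [0] * m
--     for scores in rows:
--         counts = [c + (s >= 50) for c, s in zip(counts, scores)]
--     return counts
-- ===== Notes on version B (the rewrite author's own statement) =====
-- stated objective: simpler
-- what changed: Replaces the transpose-then-build-index-lists-then-take-lengths pipeline with a single row-major accumulation into a counts vector of length min(row length).
import Mathlib
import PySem

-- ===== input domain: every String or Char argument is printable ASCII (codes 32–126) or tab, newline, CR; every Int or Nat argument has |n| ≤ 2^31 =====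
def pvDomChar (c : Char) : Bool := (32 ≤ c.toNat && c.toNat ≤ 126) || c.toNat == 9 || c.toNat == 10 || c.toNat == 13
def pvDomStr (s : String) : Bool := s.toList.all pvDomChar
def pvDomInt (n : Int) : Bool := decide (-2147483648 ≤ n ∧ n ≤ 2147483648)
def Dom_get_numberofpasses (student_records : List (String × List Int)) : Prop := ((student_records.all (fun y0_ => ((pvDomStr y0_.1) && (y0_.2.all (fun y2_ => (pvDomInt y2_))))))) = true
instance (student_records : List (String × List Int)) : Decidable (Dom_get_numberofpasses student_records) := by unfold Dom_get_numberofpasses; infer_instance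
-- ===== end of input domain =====

-- B replaces A's transpose → index-list → lengths pipeline with one row-major
-- accumulation into a counts vector (objective: simpler).

-- ===== PORT A =====
-- Python zip(*rows): columns until the shortest row is exhausted; zip() (no rows) is empty.
def pyZipCols (rows : List (List Int)) : List (List Int) :=
  if h : rows.isEmpty || rows.any List.isEmpty then []
  else (rows.map (fun r => r.headD 0)) :: pyZipCols (rows.map (fun r => r.tail))
termination_by (rows.headD []).length
decreasing_by
  simp only [Bool.or_eq_true, List.isEmpty_iff, List.any_eq_true, not_or, not_exists] at h
  rcases h with ⟨hne, hnone⟩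
  cases rows with
  | nil => exact absurd rfl hne
  | cons r rs =>
    have hr : r ≠ [] := fun he => hnone r ⟨List.mem_cons_self .., he⟩
    cases r with
    | nil => exact absurd rfl hr
    | cons a t => simp

def get_numberofpasses (student_records : List (String × List Int)) : List Int :=
  let subject_score_lists3 := pyZipCols (student_records.map Prod.snd)
  let pass_list := subject_score_lists3.map
    (fun scores => ((PySem.List.enumerate scores).filter (fun p => decide (50 ≤ p.2))).map Prod.fst)
  pass_list.map (fun values => (values.length : Int))

-- ===== PORT B =====
def get_numberofpasses_alt (student_records : List (String × List Int)) : List Int :=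
  let rows := student_records.map Prod.snd
  match rows with
  | [] => []
  | r :: rs =>
    let m : Nat := rs.foldl (fun acc s => min acc s.length) r.length
    (r :: rs).foldl
      (fun counts scores =>
        List.zipWith (fun c s => c + (if 50 ≤ s then (1 : Int) else 0)) counts scores)
      (List.replicate m (0 : Int))

-- ===== PRECONDITION & SPEC =====
def Spec_get_numberofpasses (student_records : List (String × List Int)) (out : List Int) : Prop := out = get_numberofpasses_alt student_records
instance (student_records : List (String × List Int)) (out : List Int) : Decidable (Spec_get_numberofpasses student_records out) := by unfold Spec_get_numberofpasses; infer_instance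

-- ===== CLAIM (what is proved, stated in full; the proofs are below) =====
def Claim_equal_get_numberofpasses : Prop := ∀ (student_records : List (String × List Int)), Dom_get_numberofpasses student_records → Spec_get_numberofpasses student_records (get_numberofpasses student_records)

-- ===== LEMMAS AND PROOFS =====

-- minimum row length (0 for no rows), matching B's fold
def mlen (rows : List (List Int)) : Nat :=
  match rows with
  | [] => 0
  | r :: rs => rs.foldl (fun acc s => min acc s.length) r.length

-- the common closed form: per column j, the number of rows passing at j
def specF (rows : List (List Int)) : List Int :=
  (List.range (mlen rows)).map
    (fun j => (rows.countP (fun r => decide (50 ≤ r.getD j 0)) : Int))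

lemma foldl_min_le_init (l : List (List Int)) (a : Nat) :
    l.foldl (fun acc s => min acc s.length) a ≤ a := by
  induction l generalizing a with
  | nil => simp
  | cons s l ih => exact le_trans (ih _) (Nat.min_le_left _ _)

lemma foldl_min_le_mem (l : List (List Int)) (a : Nat) (x : List Int) (hx : x ∈ l) :
    l.foldl (fun acc s => min acc s.length) a ≤ x.length := by
  induction l generalizing a with
  | nil => simp at hx
  | cons s l ih =>
    simp only [List.foldl_cons]
    rcases List.mem_cons.mp hx with h | h
    · subst h; exact le_trans (foldl_min_le_init _ _) (Nat.min_le_right _ _)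
    · exact ih _ h

lemma mlen_le (rows : List (List Int)) (x : List Int) (hx : x ∈ rows) :
    mlen rows ≤ x.length := by
  cases rows with
  | nil => simp at hx
  | cons r rs =>
    simp only [mlen]
    rcases List.mem_cons.mp hx with h | h
    · subst h; exact foldl_min_le_init _ _
    · exact foldl_min_le_mem _ _ _ h

lemma foldl_min_pos (l : List (List Int)) (a : Nat) (ha : 1 ≤ a)
    (h : ∀ x ∈ l, 1 ≤ x.length) :
    1 ≤ l.foldl (fun acc s => min acc s.length) a := by
  induction l generalizing a with
  | nil => simpa
  | cons s l ih =>
    refine ih _ ?_ (fun x hx => h x (List.mem_cons_of_mem _ hx))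
    exact le_min ha (h s (List.mem_cons_self ..))

lemma foldl_min_tail (l : List (List Int)) (a : Nat) (ha : 1 ≤ a)
    (h : ∀ x ∈ l, 1 ≤ x.length) :
    (l.map (fun r => r.tail)).foldl (fun acc s => min acc s.length) (a - 1)
      = l.foldl (fun acc s => min acc s.length) a - 1 := by
  induction l generalizing a with
  | nil => simp
  | cons s l ih =>
    have hs : 1 ≤ s.length := h s (List.mem_cons_self ..)
    have : min (a - 1) s.tail.length = min a s.length - 1 := by
      simp [List.length_tail]; omega
    simp only [List.map_cons, List.foldl_cons, this]
    exact ih _ (by omega) (fun x hx => h x (List.mem_cons_of_mem _ hx))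

lemma mlen_tail (rows : List (List Int)) (hne : rows ≠ [])
    (h : ∀ x ∈ rows, 1 ≤ x.length) :
    mlen (rows.map (fun r => r.tail)) = mlen rows - 1 := by
  cases rows with
  | nil => exact absurd rfl hne
  | cons r rs =>
    have hr : 1 ≤ r.length := h r (List.mem_cons_self ..)
    simpa [mlen, List.length_tail] using
      foldl_min_tail rs r.length hr (fun x hx => h x (List.mem_cons_of_mem _ hx))

lemma mlen_pos (rows : List (List Int)) (hne : rows ≠ [])
    (h : ∀ x ∈ rows, 1 ≤ x.length) : 1 ≤ mlen rows := by
  cases rows with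
  | nil => exact absurd rfl hne
  | cons r rs =>
    exact foldl_min_pos rs r.length (h r (List.mem_cons_self ..))
      (fun x hx => h x (List.mem_cons_of_mem _ hx))

-- getD through head/tail
lemma getD_zero (r : List Int) : r.getD 0 0 = r.headD 0 := by cases r <;> simp
lemma getD_succ (r : List Int) (j : Nat) : r.getD (j + 1) 0 = r.tail.getD j 0 := by
  cases r <;> simp

lemma pyZipCols_eq (rows : List (List Int)) :
    pyZipCols rows
      = (List.range (mlen rows)).map (fun j => rows.map (fun r => r.getD j 0)) := by
  by_cases h : (rows.isEmpty || rows.any List.isEmpty) = true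
  · rw [pyZipCols, dif_pos h]
    simp only [Bool.or_eq_true, List.isEmpty_iff, List.any_eq_true] at h
    rcases h with h | ⟨x, hx, hxe⟩
    · subst h; simp [mlen]
    · have hx0 : x.length = 0 := by simpa [List.isEmpty_iff, List.length_eq_zero_iff] using hxe
      have : mlen rows = 0 := by
        have := mlen_le rows x hx; omega
      simp [this]
  · rw [pyZipCols, dif_neg (by simpa using h)]
    simp only [Bool.or_eq_true, List.isEmpty_iff, List.any_eq_true, not_or, not_exists] at h
    rcases h with ⟨hne, hnone⟩
    have hall : ∀ x ∈ rows, 1 ≤ x.length := by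
      intro x hx
      have hx0 : x ≠ [] := fun he => hnone x ⟨hx, he⟩
      cases x with
      | nil => exact absurd rfl hx0
      | cons a t => simp
    have hpos := mlen_pos rows hne hall
    have htail := mlen_tail rows hne hall
    rw [pyZipCols_eq (rows.map (fun r => r.tail))]
    rw [htail]
    obtain ⟨m, hm⟩ : ∃ m, mlen rows = m + 1 := ⟨mlen rows - 1, by omega⟩
    rw [hm]
    simp only [Nat.add_sub_cancel, List.range_succ_eq_map, List.map_cons, List.map_map]
    refine congrArg₂ List.cons ?_ ?_
    · exact List.map_congr_left (fun r _ => (getD_zero r).symm)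
    · refine List.map_congr_left (fun j _ => ?_)
      simp only [Function.comp]
      exact List.map_congr_left (fun r _ => (getD_succ r j).symm)
termination_by (rows.headD []).length
decreasing_by
  simp only [Bool.or_eq_true, List.isEmpty_iff, List.any_eq_true, not_or, not_exists] at h
  rcases h with ⟨hne, hnone⟩
  cases rows with
  | nil => exact absurd rfl hne
  | cons r rs =>
    have hr : r ≠ [] := fun he => hnone r ⟨List.mem_cons_self .., he⟩
    cases r with
    | nil => exact absurd rfl hr
    | cons a t => simp

-- length of the filtered enumeration = countP on the scores
lemma enum_filter_len (scores : List Int) (s : Int) :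
    (((PySem.List.enumerate scores s).filter (fun p => decide (50 ≤ p.2))).map Prod.fst).length
      = scores.countP (fun x => decide (50 ≤ x)) := by
  induction scores generalizing s with
  | nil => simp [PySem.List.enumerate_nil]
  | cons x xs ih =>
    rw [PySem.List.enumerate_cons]
    by_cases hx : (50 : Int) ≤ x
    · simp [hx, ih]
    · simp [hx, ih]

-- A equals the closed form
lemma A_eq_specF (sr : List (String × List Int)) :
    get_numberofpasses sr = specF (sr.map Prod.snd) := by
  unfold get_numberofpasses specF
  rw [pyZipCols_eq]
  simp only [List.map_map]
  refine List.map_congr_left (fun j _ => ?_)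
  simp only [Function.comp]
  rw [enum_filter_len]
  simp only [List.countP_map]
  rfl

-- B's fold, characterized pointwise
lemma foldl_zip_eq (rows : List (List Int)) (init : List Int)
    (h : ∀ r ∈ rows, init.length ≤ r.length) :
    rows.foldl
        (fun counts scores =>
          List.zipWith (fun c s => c + (if 50 ≤ s then (1 : Int) else 0)) counts scores)
        init
      = (List.range init.length).map
          (fun j => init.getD j 0 + (rows.countP (fun r => decide (50 ≤ r.getD j 0)) : Int)) := by
  induction rows generalizing init with
  | nil =>
    simp only [List.foldl_nil, List.countP_nil, Nat.cast_zero, add_zero]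
    refine List.ext_getElem (by simp) ?_
    intro j h1 h2
    simp only [List.getElem_map, List.getElem_range]
    rw [List.getD_eq_getElem _ _ (by simpa using h2)]
  | cons s rs ih =>
    have hs : init.length ≤ s.length := h s (List.mem_cons_self ..)
    have hlen : (List.zipWith (fun c s => c + (if 50 ≤ s then (1 : Int) else 0)) init s).length
        = init.length := by simp [List.length_zipWith]; omega
    rw [List.foldl_cons, ih _ (by rw [hlen]; exact fun r hr => h r (List.mem_cons_of_mem _ hr))]
    rw [hlen]
    refine List.map_congr_left (fun j hj => ?_)
    have hjlt : j < init.length := List.mem_range.mp hj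
    have hget : (List.zipWith (fun c s => c + (if 50 ≤ s then (1 : Int) else 0)) init s).getD j 0
        = init.getD j 0 + (if 50 ≤ s.getD j 0 then (1 : Int) else 0) := by
      rw [List.getD_eq_getElem _ _ (by omega), List.getD_eq_getElem _ _ hjlt,
        List.getD_eq_getElem _ _ (by omega), List.getElem_zipWith]
    rw [hget, List.countP_cons]
    by_cases hc : (50 : Int) ≤ s.getD j 0 <;> simp [hc] <;> ring

-- B equals the closed form
lemma B_eq_specF (sr : List (String × List Int)) :
    get_numberofpasses_alt sr = specF (sr.map Prod.snd) := by
  unfold get_numberofpasses_alt specF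
  cases hrows : sr.map Prod.snd with
  | nil => simp [mlen]
  | cons r rs =>
    simp only
    rw [foldl_zip_eq (r :: rs) _ (by
      intro x hx
      rw [List.length_replicate]
      exact mlen_le (r :: rs) x hx)]
    rw [List.length_replicate]
    refine List.map_congr_left (fun j hj => ?_)
    rw [List.getD_eq_getElem _ _ (by simpa using List.mem_range.mp hj)]
    simp [mlen]

-- ===== VERDICT (by name: the statement is the Claim_ definition above) =====
theorem get_numberofpasses_spec : Claim_equal_get_numberofpasses := by
  intro sr _
  unfold Spec_get_numberofpasses
  rw [A_eq_specF, B_eq_specF]
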